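-- pv_equiv track=rewrite | github.com/shenzc7/ProfitLift | app/mining/eclat.py | _get_subsets
-- ===== SOURCE A (Python) =====
-- from typing import List, Dict, Set, Tuple
--
-- def _get_subsets(itemset: Set[str], size: int) -> List[Set[str]]:
--     """Get all subsets of given size from itemset."""
--     items = list(itemset)
--     subsets = []
--
--     def backtrack(start: int, current: Set[str]):
--         if len(current) == size:
--             subsets.append(current.copy())
--             return
--
--         for i in range(start, len(items)):
--             current.add(items[i])
--             backtrack(i + 1, current)
--             current.remove(items[i])
--
--     backtrack(0, set())
--     return subsets
-- ===== SOURCE B (Python) =====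
-- from typing import List, Set
--
-- def _get_subsets(itemset: Set[str], size: int) -> List[Set[str]]:
--     """Get all subsets of given size from itemset."""
--     items = list(itemset)
--
--     def comb(seq, k):
--         if k < 0 or k > len(seq):
--             return []
--         if k == 0:
--             return [set()]
--         head, rest = seq[0], seq[1:]
--         return [{head} | c for c in comb(rest, k - 1)] + comb(rest, k)
--
--     return comb(items, size)
-- ===== Notes on version B (the rewrite author's own statement) =====
-- stated objective: alternative
-- what changed: Replaced the mutating index-based backtracking (shared 'current' set with add/remove and an accumulator list) by a pure structural recursion on the item list using the combinations recurrence C(x::rest,k) = map (insert x) C(rest,k-1) ++ C(rest,k) with k<0 / k>len pruning; same subsets in the same order.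
import Mathlib
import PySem

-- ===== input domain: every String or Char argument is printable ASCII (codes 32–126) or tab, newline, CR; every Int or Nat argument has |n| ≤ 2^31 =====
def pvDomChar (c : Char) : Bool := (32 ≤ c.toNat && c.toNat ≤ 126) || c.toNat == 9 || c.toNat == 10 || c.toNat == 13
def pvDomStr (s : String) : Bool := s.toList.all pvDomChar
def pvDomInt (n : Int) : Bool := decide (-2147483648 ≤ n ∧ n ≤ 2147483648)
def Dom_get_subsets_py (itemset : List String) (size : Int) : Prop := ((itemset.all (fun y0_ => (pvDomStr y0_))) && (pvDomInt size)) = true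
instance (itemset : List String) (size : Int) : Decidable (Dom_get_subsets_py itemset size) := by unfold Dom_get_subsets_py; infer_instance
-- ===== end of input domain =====

-- B replaces A's mutating index-based backtracking by a pure structural recursion on the
-- item list (the combinations recurrence); same subsets, same order ('alternative').
-- `itemset` is a Python set, modelled per the convention as the list of its distinct elements.

-- ===== PORT A =====
-- Mutual transliteration of A's `backtrack`: `btA` is one call of backtrack(start, current)
-- (the set `current` kept as a list in insertion order — its elements are distinct items of the
-- set `itemset`; `subsets` is the growing result list), `btLoop` is its
-- `for i in range(start, len(items))` loop, where `backtrack(i+1, current∪{items[i]})` followed by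
-- `current.remove(items[i])` leaves `current` unchanged for the next iteration.
-- `fuel` only makes the mutual recursion structural; `items.length` fuel always suffices.
mutual
def btA (items : List String) (size : Int) (fuel : Nat) (start : Nat)
    (current : List String) (subsets : List (List String)) : List (List String) :=
  if (current.length : Int) = size then subsets ++ [current]
  else btLoop items size fuel start current subsets
termination_by (fuel, 1)

def btLoop (items : List String) (size : Int) (fuel : Nat) (i : Nat)
    (current : List String) (subsets : List (List String)) : List (List String) :=
  match fuel with
  | 0 => subsets
  | fuel + 1 =>
    if i < items.length then
      btLoop items size fuel (i + 1) current
        (btA items size fuel (i + 1) (current ++ [items.getD i ""]) subsets)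
    else subsets
termination_by (fuel, 0)
end

def get_subsets_py (itemset : List String) (size : Int) : List (List String) :=
  btA itemset size itemset.length 0 [] []

-- ===== PORT B =====
-- Transliteration of Source B's `comb`: structural recursion on the sequence
-- (the `| [] => []` arm is unreachable: there 0 < k ≤ seq.length).
def combB : List String → Int → List (List String)
  | seq, k =>
    if k < 0 ∨ (seq.length : Int) < k then []
    else if k = 0 then [[]]
    else
      match seq with
      | [] => []
      | x :: rest => (combB rest (k - 1)).map (fun c => x :: c) ++ combB rest k
termination_by seq _ => seq.length

def get_subsets_py_alt (itemset : List String) (size : Int) : List (List String) :=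
  combB itemset size

-- ===== PRECONDITION & SPEC =====
def Spec_get_subsets_py (itemset : List String) (size : Int) (out : List (List String)) : Prop := out = get_subsets_py_alt itemset size
instance (itemset : List String) (size : Int) (out : List (List String)) : Decidable (Spec_get_subsets_py itemset size out) := by unfold Spec_get_subsets_py; infer_instance

-- ===== CLAIM (what is proved, stated in full; the proofs are below) =====
def Claim_equal_get_subsets_py : Prop := ∀ (itemset : List String) (size : Int), Dom_get_subsets_py itemset size → Spec_get_subsets_py itemset size (get_subsets_py itemset size)

-- ===== LEMMAS AND PROOFS =====

lemma combB_zero (seq : List String) : combB seq 0 = [[]] := by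
  unfold combB; simp

lemma combB_eq_nil_of (seq : List String) {k : Int}
    (h : k < 0 ∨ (seq.length : Int) < k) : combB seq k = [] := by
  unfold combB; rw [if_pos h]

lemma combB_nil {k : Int} (hk : k ≠ 0) : combB [] k = [] :=
  combB_eq_nil_of [] (by simp; omega)

lemma combB_cons (x : String) (rest : List String) {k : Int} (hk : k ≠ 0) :
    combB (x :: rest) k = (combB rest (k - 1)).map (fun c => x :: c) ++ combB rest k := by
  by_cases hguard : k < 0 ∨ ((x :: rest).length : Int) < k
  · simp only [List.length_cons] at hguard
    push_cast at hguard
    rw [combB_eq_nil_of _ (by simp only [List.length_cons]; push_cast; omega),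
        combB_eq_nil_of rest (k := k - 1) (by omega),
        combB_eq_nil_of rest (k := k) (by omega)]
    simp
  · conv_lhs => rw [combB]
    rw [if_neg hguard, if_neg hk]

lemma loop_eq : ∀ (fuel : Nat) (items : List String) (size : Int) (i : Nat)
    (current : List String) (subsets : List (List String)),
    items.length ≤ fuel + i → size - (current.length : Int) ≠ 0 →
    btLoop items size fuel i current subsets
      = subsets ++ (combB (items.drop i) (size - current.length)).map (fun c => current ++ c) := by
  intro fuel
  induction fuel with
  | zero =>
    intro items size i current subsets hle hk
    rw [btLoop, List.drop_eq_nil_of_le (by omega), combB_nil hk]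
    simp
  | succ fuel ih =>
    intro items size i current subsets hle hk
    rw [btLoop]
    by_cases hi : i < items.length
    · simp only [hi, if_true]
      have hdrop : items.drop i = items[i] :: items.drop (i + 1) :=
        List.drop_eq_getElem_cons hi
      have hgetD : items.getD i "" = items[i] := List.getD_eq_getElem items "" hi
      have hlen : size - (((current ++ [items[i]]).length : Nat) : Int)
          = size - current.length - 1 := by simp; ring
      have hA : btA items size fuel (i + 1) (current ++ [items[i]]) subsets
          = subsets ++ (combB (items.drop (i + 1)) (size - current.length - 1)).map
              (fun c => (current ++ [items[i]]) ++ c) := by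
        rw [btA]
        by_cases hs : (((current ++ [items[i]]).length : Nat) : Int) = size
        · rw [if_pos hs,
              show size - (current.length : Int) - 1 = 0 from by rw [← hlen, hs]; ring,
              combB_zero]
          simp
        · rw [if_neg hs,
              ih items size (i + 1) (current ++ [items[i]]) subsets (by omega)
                (by rw [hlen]; rw [← hlen]; intro h; exact hs (by omega)),
              hlen]
      rw [hgetD, hA, ih items size (i + 1) current _ (by omega) hk, hdrop,
          combB_cons items[i] (items.drop (i + 1)) hk]
      rw [List.map_append, List.map_map, List.append_assoc]
      congr 2
      apply List.map_congr_left
      intro c _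
      simp
    · simp only [hi, if_false]
      rw [List.drop_eq_nil_of_le (by omega), combB_nil hk]
      simp

-- ===== VERDICT (by name: the statement is the Claim_ definition above) =====
theorem get_subsets_py_spec : Claim_equal_get_subsets_py := by
  intro itemset size _
  unfold Spec_get_subsets_py get_subsets_py get_subsets_py_alt
  rw [btA]
  by_cases h0 : size = 0
  · rw [if_pos (by simp [h0]), h0, combB_zero]
    simp
  · have hk : size - ((([] : List String).length : Nat) : Int) ≠ 0 := by simpa using h0
    rw [if_neg (by simpa using fun h => h0 h.symm),
        loop_eq itemset.length itemset size 0 [] [] (by omega) hk]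
    simp
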